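-- pv_equiv track=rewrite | github.com/lukascoding/ampbot | src/ampbot/ampbot/Lib/ampbot/Parse.py | TrackArtists
-- ===== SOURCE A (Python) =====
-- def TrackArtists(track):
--     artists = ''
--     if len(track['artists']) > 0:
--         if len(track['artists']) == 1:
--             artists += track['artists'][0]['name']
--         else:
--             count = 1
--             for artist in track['artists']:
--                 artists += '{0} '.format(artist['name'])
--                 if len(track['artists']) > count:
--                     artists += '& '
--                 count += 1
--     return artists
-- ===== SOURCE B (Python) =====
-- def TrackArtists(track):
--     arts = track['artists']
--     if len(arts) == 0:
--         return ''
--     if len(arts) == 1: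
--         return '' + arts[0]['name']
--
--     def rec(lst):
--         piece = '{0} '.format(lst[0]['name'])
--         if len(lst) == 1:
--             return piece
--         return piece + '& ' + rec(lst[1:])
--
--     return rec(arts)
-- ===== Notes on version B (the rewrite author's own statement) =====
-- stated objective: alternative
-- what changed: Replaces A's counter-driven loop that grows one accumulator string and compares a running count against the list length with structural recursion on the artist list: each call emits its head's piece, decides last-vs-not by whether the tail is empty, and the result is assembled from the right as the recursion unwinds (no counter, no accumulator).
import Mathlib
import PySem

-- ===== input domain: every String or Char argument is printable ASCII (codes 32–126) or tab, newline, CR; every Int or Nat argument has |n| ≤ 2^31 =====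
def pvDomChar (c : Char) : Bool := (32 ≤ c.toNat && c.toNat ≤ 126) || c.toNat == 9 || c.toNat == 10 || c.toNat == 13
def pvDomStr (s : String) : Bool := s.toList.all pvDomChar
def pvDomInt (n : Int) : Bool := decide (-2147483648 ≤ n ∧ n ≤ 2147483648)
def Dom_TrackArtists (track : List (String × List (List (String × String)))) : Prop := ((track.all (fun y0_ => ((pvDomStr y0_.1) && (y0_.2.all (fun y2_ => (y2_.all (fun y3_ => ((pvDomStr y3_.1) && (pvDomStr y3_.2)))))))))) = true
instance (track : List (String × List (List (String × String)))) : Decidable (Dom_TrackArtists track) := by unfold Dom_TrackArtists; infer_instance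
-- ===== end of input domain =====

-- B replaces A's counter-driven accumulator loop with structural recursion on the artist list
-- (last-vs-not decided by the tail; string assembled from the right) — objective: alternative.
-- Strings are handled through List Char, where concatenation is exact for the kernel.

-- dict lookup d[k] on an association list: first match; none = KeyError
def pyLookup {α : Type} (d : List (String × α)) (k : String) : Option α :=
  (d.find? (fun p => p.1 == k)).map (·.2)

-- ===== PORT A =====
def TrackArtists (track : List (String × List (List (String × String)))) : String :=
  let artists : List Char := []                        -- artists = ''
  match pyLookup track "artists" with
  | none => ""                                         -- KeyError: excluded by Pre_
  | some arts =>
    String.ofList (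
      if arts.length > 0 then
        if arts.length = 1 then
          match PySem.List.pyGet? arts 0 with          -- track['artists'][0]
          | some a0 =>
            artists ++ (match pyLookup a0 "name" with  -- += …['name'] (KeyError excluded by Pre_)
                        | some n => n.toList
                        | none => [])
          | none => artists                            -- unreachable (length = 1)
        else
          -- count = 1; for artist in track['artists']: …
          (arts.foldl (fun (st : List Char × Int) artist =>
              let s := st.1 ++ (match pyLookup artist "name" with
                                | some n => n.toList
                                | none => []) ++ [' ']            -- += '{0} '.format(…)
              let s := if (arts.length : Int) > st.2 then s ++ ['&', ' '] else s  -- += '& '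
              (s, st.2 + 1)) (artists, (1 : Int))).1
      else artists)

-- ===== PORT B =====
-- rec(lst) of Source B: structural recursion, last element detected by an empty tail
def TrackArtistsRec : List (List (String × String)) → List Char
  | [] => []                                           -- unreachable: Source B only calls rec on non-empty lists
  | x :: t =>
    let piece := (match pyLookup x "name" with
                  | some n => n.toList
                  | none => []) ++ [' ']               -- '{0} '.format(lst[0]['name'])
    match t with
    | [] => piece                                      -- len(lst) == 1
    | y :: t2 => piece ++ ['&', ' '] ++ TrackArtistsRec (y :: t2)

def TrackArtists_alt (track : List (String × List (List (String × String)))) : String :=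
  match pyLookup track "artists" with
  | none => ""                                         -- KeyError: excluded by Pre_
  | some arts =>
    if arts.length = 0 then ""
    else if arts.length = 1 then
      match PySem.List.pyGet? arts 0 with              -- '' + arts[0]['name']
      | some a0 => (pyLookup a0 "name").getD ""
      | none => ""                                     -- unreachable (length = 1)
    else String.ofList (TrackArtistsRec arts)

-- ===== PRECONDITION & SPEC =====
-- Pre_ excludes exactly the inputs where the Python A raises KeyError: a track without an
-- 'artists' key, or an artist dict without a 'name' key (B raises there too).
def Pre_TrackArtists (track : List (String × List (List (String × String)))) : Prop :=
  ((pyLookup track "artists").elim false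
    (fun arts => arts.all (fun a => (pyLookup a "name").isSome))) = true
instance (track : List (String × List (List (String × String)))) : Decidable (Pre_TrackArtists track) := by unfold Pre_TrackArtists; infer_instance

def pvWitness_TrackArtists : (List (String × List (List (String × String)))) :=
  [("artists", [[("name", "alice")], [("name", "bob")]])]

def Spec_TrackArtists (track : List (String × List (List (String × String)))) (out : String) : Prop := out = TrackArtists_alt track
instance (track : List (String × List (List (String × String)))) (out : String) : Decidable (Spec_TrackArtists track out) := by unfold Spec_TrackArtists; infer_instance

-- ===== CLAIM (what is proved, stated in full; the proofs are below) =====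
def Claim_equal_TrackArtists : Prop := ∀ (track : List (String × List (List (String × String)))), Dom_TrackArtists track → Pre_TrackArtists track → Spec_TrackArtists track (TrackArtists track)

-- ===== LEMMAS AND PROOFS =====

-- A's loop, started at count c with the invariant c + |l| = n + 1, produces acc ++ TrackArtistsRec l
lemma loop_eq (n : Int) (l : List (List (String × String))) : ∀ (acc : List Char) (c : Int),
    c + l.length = n + 1 →
    (l.foldl (fun (st : List Char × Int) artist =>
        (if n > st.2 then
           st.1 ++ (match pyLookup artist "name" with
                    | some m => m.toList | none => []) ++ [' '] ++ ['&', ' ']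
         else st.1 ++ (match pyLookup artist "name" with
                       | some m => m.toList | none => []) ++ [' '],
         st.2 + 1)) (acc, c)).1 = acc ++ TrackArtistsRec l := by
  induction l with
  | nil => intro acc c _; simp [TrackArtistsRec]
  | cons x rest ih =>
    intro acc c hc
    cases rest with
    | nil =>
      have hnc : ¬ n > c := by simp at hc; omega
      simp [List.foldl, TrackArtistsRec, hnc]
    | cons y t =>
      have hcn : n > c := by simp at hc; omega
      have h2 := ih (acc ++ (match pyLookup x "name" with
                             | some m => m.toList | none => []) ++ [' '] ++ ['&', ' '])
                    (c + 1) (by simp at hc ⊢; omega)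
      simp only [List.foldl, hcn, if_pos] at h2 ⊢
      rw [h2, TrackArtistsRec]
      simp

-- ===== VERDICT (by name: the statement is the Claim_ definition above) =====
theorem TrackArtists_spec : Claim_equal_TrackArtists := by
  intro track _ _
  unfold Spec_TrackArtists TrackArtists TrackArtists_alt
  cases hl : pyLookup track "artists" with
  | none => rfl
  | some arts =>
    cases arts with
    | nil => rfl
    | cons a rest =>
      cases rest with
      | nil =>
        have hg : PySem.List.pyGet? [a] 0 = some a := by
          simp [PySem.List.pyGet?, PySem.List.pyIdx?]
        simp only [List.length_cons, List.length_nil, Nat.zero_add, hg,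
          gt_iff_lt, if_pos (by norm_num : (0:Nat) < 1), if_neg (by norm_num : ¬ (1:Nat) = 0)]
        cases hn : pyLookup a "name" with
        | none => rfl
        | some nm =>
          apply String.toList_injective
          simp
      | cons b rest2 =>
        have hgt : (a :: b :: rest2).length > 0 := by simp
        have hne : ¬ (a :: b :: rest2).length = 1 := by simp
        have hne0 : ¬ (a :: b :: rest2).length = 0 := by simp
        simp only [if_pos hgt, if_neg hne, if_neg hne0]
        congr 1
        rw [loop_eq (((a :: b :: rest2).length : Nat) : Int) (a :: b :: rest2) [] 1
              (by simp; omega)]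
        simp
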